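-- pv_equiv track=rewrite | github.com/HexRoy/Python-Coding-Challenge-Problems | DCP 36 Largest Range Inclusive Integers.py | longest_range
-- ===== SOURCE A (Python) =====
-- def longest_range(n):
--     n.sort()
--     lower = None
--     upper = None
--     max_sequence = 1
--     temp = 1
--
--     for i in range(1, len(n)):
--         if n[i-1]+1 == n[i]:
--             temp += 1
--             if temp > max_sequence:
--                 max_sequence = temp
--                 upper = n[i]
--                 lower = n[i-max_sequence + 1]
--         else:
--             temp = 1
--     return lower, upper
-- ===== SOURCE B (Python) =====
-- def longest_range(n):
--     n.sort()
--     # Phase 1: split the sorted list into maximal runs of consecutive (+1) values.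
--     runs = []          # list of (start, length)
--     start = None
--     count = None
--     for x in n:
--         if count is not None and start + count == x:
--             count += 1
--         else:
--             if count is not None:
--                 runs.append((start, count))
--             start, count = x, 1
--     if count is not None:
--         runs.append((start, count))
--     # Phase 2: pick the first run of length >= 2 strictly longer than the best so far.
--     best = None
--     for s, c in runs:
--         if c >= 2 and (best is None or c > best[1]):
--             best = (s, c)
--     if best is None:
--         return (None, None)
--     return (best[0], best[0] + best[1] - 1)
-- ===== Notes on version B (the rewrite author's own statement) =====
-- stated objective: alternative
-- what changed: A is one index loop over the sorted list keeping running counters (temp/max_sequence) and patching endpoints on the fly; B is a two-phase decomposition: sort, materialise the list of maximal consecutive runs as (start,length) pairs, then scan that run list for the first strictly-longest run of length >= 2.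
import Mathlib
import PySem

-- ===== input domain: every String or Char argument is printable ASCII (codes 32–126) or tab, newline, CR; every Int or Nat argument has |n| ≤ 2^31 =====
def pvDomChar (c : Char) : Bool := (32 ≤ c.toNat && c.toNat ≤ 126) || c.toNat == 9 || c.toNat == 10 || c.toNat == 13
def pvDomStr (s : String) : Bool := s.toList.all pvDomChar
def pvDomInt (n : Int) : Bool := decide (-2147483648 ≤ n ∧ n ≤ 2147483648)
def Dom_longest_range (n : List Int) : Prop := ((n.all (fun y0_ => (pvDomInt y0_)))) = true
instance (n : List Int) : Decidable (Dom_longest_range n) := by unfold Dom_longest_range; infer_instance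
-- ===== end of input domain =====

-- B replaces A's single counter-patching index loop by a two-phase decomposition (materialise
-- maximal consecutive runs, then pick the first strictly-longest run of length ≥ 2); same cost.
-- Both Pythons sort the argument list in place (n.sort()); the equivalence proved is about the return value.


-- ===== PORT A =====
-- loop body of A's "for i in range(1, len(n))", state = ((lower, upper), max_sequence, temp)
def lrLoopA (s : List Int) (st : (Option Int × Option Int) × Int × Int) (i : Int) :
    (Option Int × Option Int) × Int × Int :=
  if PySem.List.pyGetD s (i - 1) 0 + 1 = PySem.List.pyGetD s i 0 then
    let temp := st.2.2 + 1
    if st.2.1 < temp then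
      ((some (PySem.List.pyGetD s (i - temp + 1) 0), some (PySem.List.pyGetD s i 0)), temp, temp)
    else (st.1, st.2.1, temp)
  else (st.1, st.2.1, 1)

def longest_range (n : List Int) : Option Int × Option Int :=
  let s := PySem.List.sorted n id
  let fin := (PySem.List.pyRange 1 (s.length : Int)).foldl (lrLoopA s) ((none, none), 1, 1)
  fin.1

-- ===== PORT B =====
-- phase 1 body: extend the current run or flush it to the runs list; state = (runs, current (start, count))
def lrStep (rc : List (Int × Int) × Option (Int × Int)) (x : Int) :
    List (Int × Int) × Option (Int × Int) :=
  match rc.2 with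
  | some (st, c) =>
      if st + c = x then (rc.1, some (st, c + 1))
      else (rc.1 ++ [(st, c)], some (x, 1))
  | none => (rc.1, some (x, 1))

-- phase 2 body: "if c >= 2 and (best is None or c > best[1]): best = (s, c)"
def lrBestStep (best : Option (Int × Int)) (r : Int × Int) : Option (Int × Int) :=
  match best with
  | none => if 2 ≤ r.2 then some r else none
  | some b => if 2 ≤ r.2 ∧ b.2 < r.2 then some r else some b

def longest_range_alt (n : List Int) : Option Int × Option Int :=
  let s := PySem.List.sorted n id
  let rc := s.foldl lrStep ([], none)
  let runs := match rc.2 with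
    | some cur => rc.1 ++ [cur]
    | none => rc.1
  match runs.foldl lrBestStep none with
  | none => (none, none)
  | some b => (some b.1, some (b.1 + b.2 - 1))

-- ===== PRECONDITION & SPEC =====
def Spec_longest_range (n : List Int) (out : Option Int × Option Int) : Prop := out = longest_range_alt n
instance (n : List Int) (out : Option Int × Option Int) : Decidable (Spec_longest_range n out) := by unfold Spec_longest_range; infer_instance

-- ===== CLAIM (what is proved, stated in full; the proofs are below) =====
def Claim_equal_longest_range : Prop := ∀ (n : List Int), Dom_longest_range n → Spec_longest_range n (longest_range n)

-- ===== LEMMAS AND PROOFS =====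

-- proof-side abbreviations
def lrBestOf (rs : List (Int × Int)) : Option (Int × Int) := rs.foldl lrBestStep none

def lrEnc : Option (Int × Int) → (Option Int × Option Int) × Int
  | none => ((none, none), 1)
  | some b => ((some b.1, some (b.1 + b.2 - 1)), b.2)

def lrGood : Option (Int × Int) → Prop
  | none => True
  | some b => 2 ≤ b.2

def lrAFold (s : List Int) (j : Int) : (Option Int × Option Int) × Int × Int :=
  (PySem.List.pyRange 1 j).foldl (lrLoopA s) ((none, none), 1, 1)

theorem lrGood_step (b : Option (Int × Int)) (r : Int × Int) (hb : lrGood b) :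
    lrGood (lrBestStep b r) := by
  cases b <;> simp only [lrBestStep] <;> split_ifs <;> simp_all [lrGood]

theorem lrBestStep_one (b : Option (Int × Int)) (x : Int) : lrBestStep b (x, 1) = b := by
  cases b <;> simp [lrBestStep]

theorem lrBestStep_grow (b : Option (Int × Int)) (hb : lrGood b) (st c : Int) (hc : 1 ≤ c) :
    lrBestStep b (st, c + 1) =
      if (lrEnc (lrBestStep b (st, c))).2 < c + 1 then some (st, c + 1)
      else lrBestStep b (st, c) := by
  cases b with
  | none =>
      simp only [lrBestStep]
      split_ifs with h1 h2 h3 <;> simp_all [lrEnc] <;> omega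
  | some p =>
      simp only [lrGood] at hb
      simp only [lrBestStep]
      split_ifs with h1 h2 h3 h4 h5 <;> simp_all [lrEnc] <;> omega

theorem lrInv (s : List Int) : ∀ (j : Nat), 1 ≤ j → j ≤ s.length →
    ∃ rs st c,
      (s.take j).foldl lrStep ([], none) = (rs, some (st, c)) ∧
      1 ≤ c ∧ c ≤ (j : Int) ∧
      (∀ k : Nat, (k : Int) < c → s.getD (j - 1 - k) 0 = st + c - 1 - k) ∧
      lrGood (lrBestOf rs) ∧
      lrAFold s j = ((lrEnc (lrBestStep (lrBestOf rs) (st, c))).1,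
                     (lrEnc (lrBestStep (lrBestOf rs) (st, c))).2, c) := by
  intro j
  induction j with
  | zero => intro h; omega
  | succ j ih =>
    intro _ hlen
    rcases Nat.eq_zero_or_pos j with hj0 | hj1
    · -- base case j + 1 = 1
      subst hj0
      cases s with
      | nil => simp at hlen
      | cons a t =>
        refine ⟨[], a, 1, ?_, by norm_num, by norm_num, ?_, ?_, ?_⟩
        · simp [lrStep]
        · intro k hk
          have : k = 0 := by omega
          subst this; simp
        · simp [lrBestOf, lrGood]
        · simp [lrAFold, PySem.List.pyRange_one_eq_nil (by norm_num : (1:Int) ≤ 1),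
                lrBestOf, lrBestStep, lrEnc]
    · -- inductive step, j ≥ 1
      obtain ⟨rs, st, c, hB, hc1, hcj, hpos, hgood, hA⟩ := ih (by omega) (by omega)
      have hjlt : j < s.length := by omega
      set x := s.getD j 0 with hxdef
      have hxg : x = s[j] := List.getD_eq_getElem s 0 hjlt
      have htake : s.take (j + 1) = s.take j ++ [x] := by
        rw [hxg, List.take_add_one, List.getElem?_eq_getElem hjlt]
        rfl
      have hBstep : (s.take (j + 1)).foldl lrStep ([], none) = lrStep (rs, some (st, c)) x := by
        rw [htake, List.foldl_append, hB]
        rfl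
      have hAstep : lrAFold s ((j + 1 : Nat) : Int) = lrLoopA s (lrAFold s j) j := by
        unfold lrAFold
        have hcast : ((j + 1 : Nat) : Int) = (j : Int) + 1 := by push_cast; ring
        rw [hcast, PySem.List.pyRange_one_succ_right (by exact_mod_cast hj1 : (1:Int) ≤ (j:Int)),
            List.foldl_append]
        rfl
      have e1 : PySem.List.pyGetD s ((j : Int) - 1) 0 = s.getD (j - 1) 0 := by
        have h : ((j : Int) - 1) = ((j - 1 : Nat) : Int) := by omega
        rw [h, PySem.List.pyGetD_natCast]
      have e2 : PySem.List.pyGetD s (j : Int) 0 = s.getD j 0 := PySem.List.pyGetD_natCast s j 0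
      have hprev : s.getD (j - 1) 0 = st + c - 1 := by
        have h := hpos 0 (by omega)
        simpa using h
      by_cases hx : st + c = x
      · -- consecutive: the current run grows
        have hBval : (s.take (j + 1)).foldl lrStep ([], none) = (rs, some (st, c + 1)) := by
          rw [hBstep]; simp [lrStep, hx]
        have hcond : PySem.List.pyGetD s ((j : Int) - 1) 0 + 1 = PySem.List.pyGetD s (j : Int) 0 := by
          rw [e1, e2, hprev, ← hxdef, ← hx]; ring
        have hidx : (j : Int) - (c + 1) + 1 = ((j - c.toNat : Nat) : Int) := by omega
        have hst : s.getD (j - c.toNat) 0 = st := by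
          have hk := hpos (c.toNat - 1) (by omega)
          have h1 : j - 1 - (c.toNat - 1) = j - c.toNat := by omega
          have h2 : ((c.toNat - 1 : Nat) : Int) = c - 1 := by omega
          rw [h1, h2] at hk
          rw [hk]; ring
        refine ⟨rs, st, c + 1, hBval, by omega, by omega, ?_, hgood, ?_⟩
        · intro k hk
          cases k with
          | zero =>
            simp only [Nat.sub_zero, Nat.add_sub_cancel, Nat.cast_zero]
            rw [← hxdef, ← hx]; ring
          | succ k' =>
            have h1 : j + 1 - 1 - (k' + 1) = j - 1 - k' := by omega
            rw [h1, hpos k' (by push_cast at hk ⊢; omega)]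
            push_cast; ring
        · rw [hAstep, hA]
          unfold lrLoopA
          rw [if_pos hcond]
          simp only
          rw [lrBestStep_grow (lrBestOf rs) hgood st c hc1]
          by_cases hm : (lrEnc (lrBestStep (lrBestOf rs) (st, c))).2 < c + 1
          · rw [if_pos hm, if_pos hm]
            have hacc : PySem.List.pyGetD s ((j : Int) - (c + 1) + 1) 0 = st := by
              rw [hidx, PySem.List.pyGetD_natCast, hst]
            rw [hacc, e2, ← hxdef]
            simp [lrEnc]
            omega
          · rw [if_neg hm, if_neg hm]
      · -- run breaks: flush the current run
        have hBval : (s.take (j + 1)).foldl lrStep ([], none) = (rs ++ [(st, c)], some (x, 1)) := by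
          rw [hBstep]; simp [lrStep, hx]
        have hcond : ¬ (PySem.List.pyGetD s ((j : Int) - 1) 0 + 1 = PySem.List.pyGetD s (j : Int) 0) := by
          rw [e1, e2, hprev, ← hxdef]
          intro h; exact hx (by omega)
        have hbo : lrBestOf (rs ++ [(st, c)]) = lrBestStep (lrBestOf rs) (st, c) := by
          simp [lrBestOf, List.foldl_append]
        refine ⟨rs ++ [(st, c)], x, 1, hBval, le_refl 1, by omega, ?_, ?_, ?_⟩
        · intro k hk
          have h0 : k = 0 := by omega
          subst h0
          have h1 : j + 1 - 1 - 0 = j := rfl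
          rw [h1, ← hxdef]
          push_cast; ring
        · rw [hbo]; exact lrGood_step _ _ hgood
        · rw [hAstep, hA]
          unfold lrLoopA
          rw [if_neg hcond, hbo, lrBestStep_one]

theorem lrAgree (s : List Int) :
    (lrAFold s (s.length : Int)).1 =
      (match (match (s.foldl lrStep ([], none)).2 with
              | some cur => (s.foldl lrStep ([], none)).1 ++ [cur]
              | none => (s.foldl lrStep ([], none)).1).foldl lrBestStep none with
       | none => ((none : Option Int), (none : Option Int))
       | some b => (some b.1, some (b.1 + b.2 - 1))) := by
  cases s with
  | nil => decide
  | cons a t =>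
    obtain ⟨rs, st, c, hB, hc1, hcj, hpos, hgood, hA⟩ :=
      lrInv (a :: t) (a :: t).length (by simp) (le_refl _)
    rw [List.take_length] at hB
    rw [hA, hB]
    have hfold : ((rs ++ [(st, c)]).foldl lrBestStep none) = lrBestStep (lrBestOf rs) (st, c) := by
      simp [lrBestOf, List.foldl_append]
    simp only [hfold]
    cases h : lrBestStep (lrBestOf rs) (st, c) <;> simp [lrEnc]

-- ===== VERDICT (by name: the statement is the Claim_ definition above) =====
theorem longest_range_spec : Claim_equal_longest_range := by
  intro n _
  unfold Spec_longest_range longest_range longest_range_alt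
  exact lrAgree (PySem.List.sorted n id)
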